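-- pv_equiv track=rewrite | github.com/bkoffman/COMP359-Assignment2 | performance_analysis.py | two_circle_josephus_deque
-- ===== SOURCE A (Python) =====
-- from collections import deque
--
-- def josephus_eliminate_deque(circle: deque, k: int = 2) -> int:
--     """Eliminate using deque rotation — O(k) per elimination."""
--     circle.rotate(-(k - 1))
--     return circle.popleft()
--
-- def two_circle_josephus_deque(n: int, k: int = 2) -> int:
--     if n <= 0:
--         raise ValueError("n must be positive")
--     if n == 1:
--         return 1
--
--     mid = (n + 1) // 2
--     circle_a = deque(range(1, mid + 1))
--     circle_b = deque(range(mid + 1, n + 1))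
--
--     if len(circle_b) == 0:
--         return circle_a[0]
--
--     while len(circle_a) > 1 or len(circle_b) > 1:
--         if len(circle_a) >= len(circle_b):
--             if len(circle_a) > 1:
--                 josephus_eliminate_deque(circle_a, k)
--             if len(circle_b) > 1:
--                 josephus_eliminate_deque(circle_b, k)
--         else:
--             if len(circle_b) > 1:
--                 josephus_eliminate_deque(circle_b, k)
--             if len(circle_a) > 1:
--                 josephus_eliminate_deque(circle_a, k)
--
--     final = deque([circle_a[0], circle_b[0]])
--     josephus_eliminate_deque(final, k)
--     return final[0]
-- ===== SOURCE B (Python) =====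
-- def two_circle_josephus_deque(n: int, k: int = 2) -> int:
--     if n <= 0:
--         raise ValueError("n must be positive")
--     if n == 1:
--         return 1
--     mid = (n + 1) // 2
--
--     def survivor_index(m: int) -> int:
--         # 0-based Josephus survivor index for a circle of m people, step k
--         j = 0
--         for i in range(2, m + 1):
--             j = (j + k) % i
--         return j
--
--     a = 1 + survivor_index(mid)             # survivor of circle 1..mid
--     b = mid + 1 + survivor_index(n - mid)   # survivor of circle mid+1..n
--     # final round on [a, b]: the element at index (k-1) % 2 is eliminated
--     return b if (k - 1) % 2 == 0 else a
-- ===== Notes on version B (the rewrite author's own statement) =====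
-- stated objective: faster
-- what changed: Replaces the explicit simulation of two deques (rotate/popleft until one survivor each, then a final two-element round) with the O(1)-per-step Josephus index recurrence j=(j+k)%i computed once per circle, combining the two survivors arithmetically.
import Mathlib
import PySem

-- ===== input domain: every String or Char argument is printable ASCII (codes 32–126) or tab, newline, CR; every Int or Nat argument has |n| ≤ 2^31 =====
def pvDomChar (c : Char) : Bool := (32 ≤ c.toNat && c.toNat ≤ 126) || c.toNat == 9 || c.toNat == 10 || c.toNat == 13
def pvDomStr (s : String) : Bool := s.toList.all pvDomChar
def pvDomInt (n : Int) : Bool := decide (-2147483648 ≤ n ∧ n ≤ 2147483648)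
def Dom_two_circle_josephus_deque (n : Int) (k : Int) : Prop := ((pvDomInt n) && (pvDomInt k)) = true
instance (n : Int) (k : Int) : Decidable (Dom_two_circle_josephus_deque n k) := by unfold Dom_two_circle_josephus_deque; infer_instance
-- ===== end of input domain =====

-- B replaces the two-deque rotate/popleft simulation by the per-circle Josephus
-- index recurrence (one O(1) step per elimination); equal return values are proved for all n ≥ 1, any k.

-- ===== PORT A =====

-- circle.rotate(-(k-1)); circle.popleft(): the deque afterwards, as a list
-- (rotation by any int then popleft = drop the element at index (k-1) mod len,
-- continuing from its successor; exact for every k, incl. negative and 0)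
def pvElim (k : Int) (c : List Int) : List Int :=
  let r := (PySem.Int.mod (k - 1) (c.length : Int)).toNat
  c.drop (r + 1) ++ c.take r

theorem pvElim_length (k : Int) (c : List Int) (h : 1 ≤ c.length) :
    (pvElim k c).length = c.length - 1 := by
  have hpos : (0 : Int) < (c.length : Int) := by exact_mod_cast h
  have hm := PySem.Int.mod_eq_emod_of_pos (a := k - 1) hpos
  have h0 : 0 ≤ (k - 1) % (c.length : Int) := Int.emod_nonneg _ (by omega)
  have h1 : (k - 1) % (c.length : Int) < (c.length : Int) := Int.emod_lt_of_pos _ hpos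
  simp only [pvElim, hm, List.length_append, List.length_drop, List.length_take]
  omega

-- the while loop of A; each iteration eliminates once from every circle of size > 1
def pvLoop (k : Int) (a b : List Int) : List Int × List Int :=
  if 1 < a.length ∨ 1 < b.length then
    if b.length ≤ a.length then
      let a' := if 1 < a.length then pvElim k a else a
      let b' := if 1 < b.length then pvElim k b else b
      pvLoop k a' b'
    else
      -- Python eliminates from b first here; the two deques are independent
      let b' := if 1 < b.length then pvElim k b else b
      let a' := if 1 < a.length then pvElim k a else a
      pvLoop k a' b'
  else (a, b)
termination_by a.length + b.length
decreasing_by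
  all_goals
    split_ifs <;> ((try rw [pvElim_length k a (by omega)]) <;>
      (try rw [pvElim_length k b (by omega)]) <;> omega)

def two_circle_josephus_deque (n : Int) (k : Int) : Int :=
  if n ≤ 0 then 0            -- A raises ValueError here; excluded by Pre_
  else if n = 1 then 1
  else
    let mid := PySem.Int.floordiv (n + 1) 2
    let ca := PySem.List.pyRange 1 (mid + 1) 1
    let cb := PySem.List.pyRange (mid + 1) (n + 1) 1
    if cb.length = 0 then ca.headD 0
    else
      let p := pvLoop k ca cb
      let final := pvElim k [p.1.headD 0, p.2.headD 0]
      final.headD 0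

-- ===== PORT B =====

-- j = 0; for i in range(2, m+1): j = (j + k) % i
def pvJos (k m : Int) : Int :=
  (PySem.List.pyRange 2 (m + 1) 1).foldl (fun j i => PySem.Int.mod (j + k) i) 0

def two_circle_josephus_deque_alt (n : Int) (k : Int) : Int :=
  if n ≤ 0 then 0            -- B raises ValueError here; excluded by Pre_
  else if n = 1 then 1
  else
    let mid := PySem.Int.floordiv (n + 1) 2
    let a := 1 + pvJos k mid
    let b := mid + 1 + pvJos k (n - mid)
    if PySem.Int.mod (k - 1) 2 = 0 then b else a

-- ===== PRECONDITION & SPEC =====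
-- A raises ValueError("n must be positive") exactly when n ≤ 0; nothing else is excluded.
def Pre_two_circle_josephus_deque (n : Int) (k : Int) : Prop := 1 ≤ n
instance (n : Int) (k : Int) : Decidable (Pre_two_circle_josephus_deque n k) := by
  unfold Pre_two_circle_josephus_deque; infer_instance
def pvWitness_two_circle_josephus_deque : Int × Int := (7, 3)

def Spec_two_circle_josephus_deque (n : Int) (k : Int) (out : Int) : Prop := out = two_circle_josephus_deque_alt n k
instance (n : Int) (k : Int) (out : Int) : Decidable (Spec_two_circle_josephus_deque n k out) := by unfold Spec_two_circle_josephus_deque; infer_instance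

-- ===== CLAIM (what is proved, stated in full; the proofs are below) =====
def Claim_equal_two_circle_josephus_deque : Prop := ∀ (n : Int) (k : Int), Dom_two_circle_josephus_deque n k → Pre_two_circle_josephus_deque n k → Spec_two_circle_josephus_deque n k (two_circle_josephus_deque n k)

-- ===== LEMMAS AND PROOFS =====

-- length of 'eliminate once if the circle still has > 1 member'
theorem pvStep_length (k : Int) (c : List Int) :
    (if 1 < c.length then pvElim k c else c).length =
      if 1 < c.length then c.length - 1 else c.length := by
  split_ifs with h
  · exact pvElim_length k c (by omega)
  · rfl

theorem pvJos_one (k : Int) : pvJos k 1 = 0 := by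
  simp [pvJos, PySem.List.pyRange_one_eq_nil (by omega : (2:Int) ≤ 2)]

theorem pvJos_succ (k m : Int) (h : 1 ≤ m) :
    pvJos k (m + 1) = (pvJos k m + k) % (m + 1) := by
  have hr : PySem.List.pyRange 2 (m + 1 + 1) 1 =
      PySem.List.pyRange 2 (m + 1) 1 ++ [m + 1] :=
    PySem.List.pyRange_one_succ_right (by omega)
  simp only [pvJos, hr, List.foldl_append, List.foldl_cons, List.foldl_nil]
  exact PySem.Int.mod_eq_emod_of_pos (by omega)

theorem pvJos_bounds (k m : Int) (h : 1 ≤ m) : 0 ≤ pvJos k m ∧ pvJos k m < m := by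
  induction m, h using Int.le_induction with
  | base => rw [pvJos_one]; omega
  | succ m hm ih =>
    rw [pvJos_succ k m hm]
    constructor
    · exact Int.emod_nonneg _ (by omega)
    · exact Int.emod_lt_of_pos _ (by omega)

-- repeated elimination until a single survivor remains
def pvSingle (k : Int) (c : List Int) : List Int :=
  if h : 1 < c.length then pvSingle k (pvElim k c) else c
termination_by c.length
decreasing_by rw [pvElim_length k c (by omega)]; omega

theorem pvSingle_of_le (k : Int) (c : List Int) (h : ¬ 1 < c.length) :
    pvSingle k c = c := by rw [pvSingle]; simp [h]

theorem pvSingle_step (k : Int) (c : List Int) (h : 1 < c.length) :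
    pvSingle k c = pvSingle k (pvElim k c) := by rw [pvSingle]; simp [h]

theorem pvLoop_eq_aux (k : Int) : ∀ (N : Nat) (a b : List Int),
    a.length + b.length ≤ N → pvLoop k a b = (pvSingle k a, pvSingle k b) := by
  intro N
  induction N with
  | zero =>
    intro a b h
    rw [pvLoop, if_neg (by omega), pvSingle_of_le k a (by omega),
      pvSingle_of_le k b (by omega)]
  | succ N ih =>
    intro a b h
    rw [pvLoop]
    by_cases hc : 1 < a.length ∨ 1 < b.length
    · rw [if_pos hc]
      have key : pvLoop k (if 1 < a.length then pvElim k a else a)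
          (if 1 < b.length then pvElim k b else b) = (pvSingle k a, pvSingle k b) := by
        rw [ih _ _ (by simp only [pvStep_length]; split_ifs <;> omega)]
        congr 1
        · by_cases h1 : 1 < a.length
          · rw [if_pos h1, pvSingle_step k a h1]
          · rw [if_neg h1]
        · by_cases h1 : 1 < b.length
          · rw [if_pos h1, pvSingle_step k b h1]
          · rw [if_neg h1]
      by_cases hab : b.length ≤ a.length
      · rw [if_pos hab]; exact key
      · rw [if_neg hab]; exact key
    · rw [if_neg hc, pvSingle_of_le k a (by omega), pvSingle_of_le k b (by omega)]

theorem pvLoop_eq (k : Int) (a b : List Int) :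
    pvLoop k a b = (pvSingle k a, pvSingle k b) :=
  pvLoop_eq_aux k (a.length + b.length) a b le_rfl

theorem emod_add_right_cancel (x y M : Int) : (x + y) % M = (x + y % M) % M := by
  have h : x + y = (x + y % M) + M * (y / M) := by
    have := Int.ediv_add_emod y M; linarith
  rw [h, Int.add_mul_emod_self_left]

theorem pvElim_getElem? (k : Int) (xs : List Int) (h2 : 2 ≤ xs.length) (j : Nat)
    (hj : j < xs.length - 1) :
    (pvElim k xs)[j]? =
      xs[(((PySem.Int.mod (k - 1) (xs.length : Int)).toNat + 1 + j) % xs.length)]? := by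
  have hpos : (0 : Int) < (xs.length : Int) := by exact_mod_cast (by omega : 0 < xs.length)
  have hm := PySem.Int.mod_eq_emod_of_pos (a := k - 1) hpos
  have h0 : 0 ≤ (k - 1) % (xs.length : Int) := Int.emod_nonneg _ (by omega)
  have h1 : (k - 1) % (xs.length : Int) < (xs.length : Int) := Int.emod_lt_of_pos _ hpos
  set r := (PySem.Int.mod (k - 1) (xs.length : Int)).toNat with hrdef
  have hr : r ≤ xs.length - 1 := by
    have : ((k - 1) % (xs.length : Int)).toNat < xs.length := by omega
    simp only [hrdef, hm]; omega
  show (xs.drop (r + 1) ++ xs.take r)[j]? = _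
  rw [List.getElem?_append]
  by_cases hcase : j < xs.length - (r + 1)
  · rw [if_pos (by simp [List.length_drop]; omega), List.getElem?_drop]
    congr 1
    rw [Nat.mod_eq_of_lt (by omega)]
  · rw [if_neg (by simp [List.length_drop]; omega), List.getElem?_take,
      if_pos (by simp [List.length_drop]; omega)]
    congr 1
    rw [Nat.mod_eq_sub_mod (by omega), Nat.mod_eq_of_lt (by omega)]
    simp [List.length_drop]; omega

theorem pvSingle_spec (k : Int) : ∀ (N : Nat) (xs : List Int), xs.length ≤ N → 1 ≤ xs.length →
    pvSingle k xs = [(xs[((pvJos k (xs.length : Int)).toNat)]?).getD 0] := by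
  intro N
  induction N with
  | zero => intro xs h h1; omega
  | succ N ih =>
    intro xs h h1
    by_cases h2 : 1 < xs.length
    · -- eliminate once, then use the induction hypothesis on the shorter circle
      rw [pvSingle_step k xs h2]
      have hlen : (pvElim k xs).length = xs.length - 1 := pvElim_length k xs (by omega)
      rw [ih (pvElim k xs) (by omega) (by omega)]
      have hcast : ((pvElim k xs).length : Int) = (xs.length : Int) - 1 := by
        rw [hlen]; omega
      have hb := pvJos_bounds k ((xs.length : Int) - 1) (by omega)
      set jp := (pvJos k ((xs.length : Int) - 1)).toNat with hjp
      have hjplt : jp < xs.length - 1 := by omega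
      rw [hcast, ← hjp, pvElim_getElem? k xs (by omega) jp hjplt]
      congr 2
      -- index arithmetic: (r + 1 + jp) % L = J(L) where J(L) = (J(L-1) + k) % L
      have hLpos : (0 : Int) < (xs.length : Int) := by exact_mod_cast (by omega : 0 < xs.length)
      have hm := PySem.Int.mod_eq_emod_of_pos (a := k - 1) hLpos
      have h0 : 0 ≤ (k - 1) % (xs.length : Int) := Int.emod_nonneg _ (by omega)
      set r := (PySem.Int.mod (k - 1) (xs.length : Int)).toNat with hrdef
      have hrval : ((r : Int)) = (k - 1) % (xs.length : Int) := by
        simp only [hrdef, hm]; omega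
      have hsucc : pvJos k (xs.length : Int) = (pvJos k ((xs.length : Int) - 1) + k) % (xs.length : Int) := by
        have := pvJos_succ k ((xs.length : Int) - 1) (by omega)
        simpa using this
      have hjpval : ((jp : Int)) = pvJos k ((xs.length : Int) - 1) := by
        simp only [hjp]; omega
      have key : pvJos k (xs.length : Int) = ((jp : Int) + (r : Int) + 1) % (xs.length : Int) := by
        rw [hsucc, ← hjpval, hrval]
        have : (jp : Int) + k = ((jp : Int) + 1) + (k - 1) := by ring
        rw [this, emod_add_right_cancel]
        ring_nf
      have : pvJos k (xs.length : Int) = (((r + 1 + jp) % xs.length : Nat) : Int) := by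
        rw [key]
        push_cast
        congr 1
        ring
      rw [this, Int.toNat_natCast]
    · rw [pvSingle_of_le k xs h2]
      have hlen : xs.length = 1 := by omega
      obtain ⟨x, rfl⟩ := List.length_eq_one_iff.mp hlen
      have : pvJos k ((1 : Nat) : Int) = 0 := pvJos_one k
      simp_all

theorem main_eq (n k : Int) (hpre : 1 ≤ n) :
    two_circle_josephus_deque n k = two_circle_josephus_deque_alt n k := by
  by_cases hn1 : n = 1
  · simp [two_circle_josephus_deque, two_circle_josephus_deque_alt, hn1]
  · have hn2 : 2 ≤ n := by omega
    have hmid : PySem.Int.floordiv (n + 1) 2 = (n + 1) / 2 :=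
      PySem.Int.floordiv_eq_ediv_of_pos (by omega)
    set mid := PySem.Int.floordiv (n + 1) 2 with hmiddef
    have hmid1 : 1 ≤ mid := by omega
    have hmidn : mid ≤ n - 1 := by omega
    -- lengths of the two circles
    have hca : (PySem.List.pyRange 1 (mid + 1) 1).length = mid.toNat := by
      rw [PySem.List.length_pyRange_one]; omega
    have hcb : (PySem.List.pyRange (mid + 1) (n + 1) 1).length = (n - mid).toNat := by
      rw [PySem.List.length_pyRange_one]; omega
    have hcbne : (PySem.List.pyRange (mid + 1) (n + 1) 1).length ≠ 0 := by omega
    -- survivors of the two circles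
    have hsa : pvSingle k (PySem.List.pyRange 1 (mid + 1) 1) = [1 + pvJos k mid] := by
      rw [pvSingle_spec k _ _ le_rfl (by omega)]
      have hb := pvJos_bounds k mid hmid1
      rw [hca]
      have hcast : ((mid.toNat : Nat) : Int) = mid := by omega
      rw [hcast, PySem.List.getElem?_pyRange_one, if_pos (by omega)]
      simp
      omega
    have hsb : pvSingle k (PySem.List.pyRange (mid + 1) (n + 1) 1) = [mid + 1 + pvJos k (n - mid)] := by
      rw [pvSingle_spec k _ _ le_rfl (by omega)]
      have hb := pvJos_bounds k (n - mid) (by omega)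
      rw [hcb]
      have hcast : (((n - mid).toNat : Nat) : Int) = n - mid := by omega
      rw [hcast, PySem.List.getElem?_pyRange_one, if_pos (by omega)]
      simp
      omega
    -- the final two-element round
    have hmod2 := PySem.Int.mod_eq_emod_of_pos (a := k - 1) (by omega : (0:Int) < 2)
    have h01 : (k - 1) % 2 = 0 ∨ (k - 1) % 2 = 1 := Int.emod_two_eq_zero_or_one _
    simp only [two_circle_josephus_deque, two_circle_josephus_deque_alt,
      if_neg (by omega : ¬ n ≤ 0), if_neg hn1, ← hmiddef, if_neg hcbne,
      pvLoop_eq, hsa, hsb]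
    rcases h01 with h0 | h1
    · have : (PySem.Int.mod (k - 1) 2).toNat = 0 := by rw [hmod2, h0]; rfl
      simp [pvElim, this, h0]
    · have : (PySem.Int.mod (k - 1) 2).toNat = 1 := by rw [hmod2, h1]; rfl
      simp [pvElim, this, h1]

-- ===== VERDICT (by name: the statement is the Claim_ definition above) =====
theorem two_circle_josephus_deque_spec : Claim_equal_two_circle_josephus_deque := by
  intro n k _ hpre
  exact main_eq n k hpre
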